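-- pv_equiv track=rewrite | github.com/jvasilakes/n2c2-track1 | ner/src/ensemble.py | get_longest_annotation
-- ===== SOURCE A (Python) =====
-- def get_longest_annotation(annotations):
--     '''
--     annotations: key=offset of a span, value = text of the span
--     '''
--     start_offsets = {}
--     for (start, end) in annotations:
--         if start in start_offsets:
--             start_offsets[start].append(end)
--         else:
--             start_offsets[start] = [end]
--     results = {}
--     for start in start_offsets:
--         end = max(start_offsets[start])
--         results[(start,end)] = annotations[(start,end)]
--
--     return results
-- ===== SOURCE B (Python) =====
-- def get_longest_annotation(annotations):
--     '''
--     No grouping dict at all: walk the starts in first-occurrence order (a seen-set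
--     dedup) and, for each start, scan annotations directly for its maximal end.
--     '''
--     results = {}
--     seen = set()
--     for (start, _end) in annotations:
--         if start in seen:
--             continue
--         seen.add(start)
--         end = max(e for (s, e) in annotations if s == start)
--         results[(start, end)] = annotations[(start, end)]
--     return results
-- ===== Notes on version B (the rewrite author's own statement) =====
-- stated objective: alternative
-- what changed: Dropped A's intermediate grouping dict of end-lists entirely: B dedups the starts with a seen-set in first-occurrence order and, for each start, finds its maximal end by a direct scan of the annotations (nested scan instead of hash grouping + per-group max).
import Mathlib
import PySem

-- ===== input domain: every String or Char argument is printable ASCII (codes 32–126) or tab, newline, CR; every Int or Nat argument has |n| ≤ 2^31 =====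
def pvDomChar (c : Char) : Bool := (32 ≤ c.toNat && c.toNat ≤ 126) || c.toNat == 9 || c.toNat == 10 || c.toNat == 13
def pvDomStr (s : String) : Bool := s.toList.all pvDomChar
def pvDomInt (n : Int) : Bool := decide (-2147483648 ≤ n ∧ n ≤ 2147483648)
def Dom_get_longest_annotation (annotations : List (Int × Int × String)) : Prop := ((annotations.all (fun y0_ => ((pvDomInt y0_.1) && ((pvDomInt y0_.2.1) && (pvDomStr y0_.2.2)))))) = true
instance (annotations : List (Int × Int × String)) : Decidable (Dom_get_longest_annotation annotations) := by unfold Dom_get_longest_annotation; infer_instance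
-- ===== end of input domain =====

-- B drops A's grouping dict of end-lists: it dedups the starts with a seen-set and finds each
-- start's maximal end by a direct scan of the annotations (objective: alternative).

-- ===== PORT A =====
-- shared dict lookup annotations[(start, end)]: first match in the association list.
-- The "" default is unreachable in both programs: the looked-up key is always a key of annotations.
def annGet (ann : List (Int × Int × String)) (k : Int × Int) : String :=
  match ann with
  | [] => ""
  | (s, e, t) :: rest => if s = k.1 ∧ e = k.2 then t else annGet rest k

def get_longest_annotation (annotations : List (Int × Int × String)) : List (Int × Int × String) :=
  -- start_offsets: for (start, end) in annotations: append end to the list at start (or start a new list)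
  let start_offsets : PySem.Dict Int (List Int) :=
    annotations.foldl
      (fun d p =>
        if d.contains p.1 then d.modify p.1 [] (fun l => l ++ [p.2.1])
        else d.insert p.1 [p.2.1])
      PySem.Dict.empty
  -- results: for start in start_offsets: end = max(start_offsets[start]); results[(start,end)] = annotations[(start,end)]
  -- (the .getD 0 default is unreachable: every stored list is nonempty)
  let results : PySem.Dict (Int × Int) String :=
    start_offsets.keys.foldl
      (fun r s =>
        let e := (PySem.List.max? (start_offsets.getD s []) (fun x => x)).getD 0
        r.insert (s, e) (annGet annotations (s, e)))
      PySem.Dict.empty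
  results.items.map (fun q => (q.1.1, q.1.2, q.2))

-- ===== PORT B =====
def get_longest_annotation_alt (annotations : List (Int × Int × String)) : List (Int × Int × String) :=
  -- for (start, _end) in annotations: skip seen starts; else record start,
  -- end = max(e for (s, e) in annotations if s == start)  (.getD 0 unreachable: the current entry matches)
  let results : PySem.Set Int × PySem.Dict (Int × Int) String :=
    annotations.foldl
      (fun st p =>
        if st.1.contains p.1 then st
        else
          let e := (PySem.List.max?
              ((annotations.filter (fun q => q.1 == p.1)).map (fun q => q.2.1)) (fun x => x)).getD 0
          (st.1.add p.1, st.2.insert (p.1, e) (annGet annotations (p.1, e))))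
      (PySem.Set.empty, PySem.Dict.empty)
  results.2.items.map (fun q => (q.1.1, q.1.2, q.2))

-- ===== PRECONDITION & SPEC =====
def Spec_get_longest_annotation (annotations : List (Int × Int × String)) (out : List (Int × Int × String)) : Prop := out = get_longest_annotation_alt annotations
instance (annotations : List (Int × Int × String)) (out : List (Int × Int × String)) : Decidable (Spec_get_longest_annotation annotations out) := by unfold Spec_get_longest_annotation; infer_instance

-- ===== CLAIM (what is proved, stated in full; the proofs are below) =====
def Claim_equal_get_longest_annotation : Prop := ∀ (annotations : List (Int × Int × String)), Dom_get_longest_annotation annotations → Spec_get_longest_annotation annotations (get_longest_annotation annotations)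

-- ===== LEMMAS AND PROOFS =====

-- A's grouping step
def stepA (d : PySem.Dict Int (List Int)) (p : Int × Int × String) : PySem.Dict Int (List Int) :=
  if d.contains p.1 then d.modify p.1 [] (fun l => l ++ [p.2.1]) else d.insert p.1 [p.2.1]

-- ends of the entries of l whose start is s, in order
def ends (l : List (Int × Int × String)) (s : Int) : List Int :=
  (l.filter (fun q => q.1 == s)).map (fun q => q.2.1)

theorem stepA_eq_modify (d : PySem.Dict Int (List Int)) (p : Int × Int × String) :
    stepA d p = d.modify p.1 [] (fun l => l ++ [p.2.1]) := by
  unfold stepA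
  by_cases h : d.contains p.1
  · simp [h]
  · simp only [Bool.not_eq_true] at h
    simp [h, PySem.Dict.modify, PySem.Dict.getD_of_not_contains d ([] : List Int) h]

theorem groupA_keys (l : List (Int × Int × String)) :
    (l.foldl stepA PySem.Dict.empty).keys = PySem.Set.ofList (l.map (fun p => p.1)) := by
  have h : l.foldl stepA PySem.Dict.empty
      = l.foldl (fun d p => d.modify p.1 [] (fun v => v ++ [p.2.1])) PySem.Dict.empty := by
    apply PySem.List.foldl_congr_mem
    intro d p _
    exact stepA_eq_modify d p
  rw [h, PySem.Dict.keys_foldl_modify_key]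
  simp [PySem.Dict.keys_empty, PySem.Set.update_nil_left]

theorem groupA_getD (l : List (Int × Int × String)) (s : Int) :
    (l.foldl stepA PySem.Dict.empty).getD s [] = ends l s := by
  have h : l.foldl stepA PySem.Dict.empty
      = (l.map (fun p => (p.1, p.2.1))).foldl
          (fun d p => d.modify p.1 [] (fun v => v ++ [p.2])) PySem.Dict.empty := by
    rw [List.foldl_map]
    apply PySem.List.foldl_congr_mem
    intro d p _
    exact stepA_eq_modify d p
  rw [h, PySem.Dict.getD_foldl_modify_append]
  unfold ends
  simp only [PySem.Dict.getD_empty, List.nil_append, List.filter_map, List.map_map]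
  rfl

-- B's per-start inserter (fixed full list ann)
def insStep (ann : List (Int × Int × String)) (r : PySem.Dict (Int × Int) String) (s : Int) :
    PySem.Dict (Int × Int) String :=
  let e := (PySem.List.max? (ends ann s) (fun x => x)).getD 0
  r.insert (s, e) (annGet ann (s, e))

def stepB (ann : List (Int × Int × String))
    (st : PySem.Set Int × PySem.Dict (Int × Int) String) (p : Int × Int × String) :
    PySem.Set Int × PySem.Dict (Int × Int) String :=
  if st.1.contains p.1 then st
  else
    let e := (PySem.List.max?
        ((ann.filter (fun q => q.1 == p.1)).map (fun q => q.2.1)) (fun x => x)).getD 0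
    (st.1.add p.1, st.2.insert (p.1, e) (annGet ann (p.1, e)))

-- B's seen-set fold unrolls to a fold of insStep over the not-yet-seen starts
theorem bfold_eq (ann : List (Int × Int × String)) (l : List (Int × Int × String))
    (seen : PySem.Set Int) (r : PySem.Dict (Int × Int) String) :
    (l.foldl (stepB ann) (seen, r)).2
      = ((PySem.Set.update seen (l.map (fun p => p.1))).drop seen.length).foldl (insStep ann) r := by
  induction l generalizing seen r with
  | nil => simp [PySem.Set.update]
  | cons p t ih =>
    simp only [List.foldl_cons, List.map_cons, PySem.Set.update_cons]
    by_cases h : seen.contains p.1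
    · have hm : p.1 ∈ seen := by simpa using h
      have hadd : PySem.Set.add seen p.1 = seen := by
        simp [PySem.Set.add, hm]
      rw [stepB, if_pos h, ih, hadd]
    · have hm : p.1 ∉ seen := by simpa using h
      have hadd : PySem.Set.add seen p.1 = seen ++ [p.1] := by
        simp [PySem.Set.add]
        exact hm
      rw [stepB, if_neg h]
      rw [ih, hadd, PySem.Set.update_eq_append_filter]
      set R := (PySem.Set.ofList (t.map (fun p => p.1))).filter
        (fun y => !(PySem.Set.contains (seen ++ [p.1]) y)) with hR
      have d1 : ((seen ++ [p.1]) ++ R).drop (seen ++ [p.1]).length = R := List.drop_left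
      have d2 : ((seen ++ [p.1]) ++ R).drop seen.length = p.1 :: R := by
        rw [List.append_assoc]; exact List.drop_left
      rw [d1, d2, List.foldl_cons]
      rfl

-- ===== VERDICT (by name: the statement is the Claim_ definition above) =====
theorem get_longest_annotation_spec : Claim_equal_get_longest_annotation := by
  intro ann _
  unfold Spec_get_longest_annotation
  show get_longest_annotation ann = get_longest_annotation_alt ann
  unfold get_longest_annotation get_longest_annotation_alt
  have hA : ann.foldl
      (fun d p =>
        if d.contains p.1 then d.modify p.1 [] (fun l => l ++ [p.2.1])
        else d.insert p.1 [p.2.1]) PySem.Dict.empty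
      = ann.foldl stepA PySem.Dict.empty := rfl
  have hB : ann.foldl
      (fun st p =>
        if st.1.contains p.1 then st
        else
          let e := (PySem.List.max?
              ((ann.filter (fun q => q.1 == p.1)).map (fun q => q.2.1)) (fun x => x)).getD 0
          (st.1.add p.1, st.2.insert (p.1, e) (annGet ann (p.1, e))))
      (PySem.Set.empty, PySem.Dict.empty)
      = ann.foldl (stepB ann) (PySem.Set.empty, PySem.Dict.empty) := rfl
  simp only [hA, hB]
  congr 1
  rw [bfold_eq]
  have hseen : (PySem.Set.update (PySem.Set.empty : PySem.Set Int)
      (ann.map (fun p => p.1))).drop (PySem.Set.empty : PySem.Set Int).length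
      = PySem.Set.ofList (ann.map (fun p => p.1)) := by
    simp [PySem.Set.update_nil_left, PySem.Set.empty]
  rw [hseen, groupA_keys]
  congr 1
  apply PySem.List.foldl_congr_mem
  intro r s _
  rw [groupA_getD]
  rfl
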